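-- pv_equiv track=rewrite | github.com/seminss/algorithm-study | hyejinkwon/Sort/체육복.py | solution
-- ===== SOURCE A (Python) =====
-- def solution(n, lost, reserve):
--
--     # 진짜 여분이 있는 학생
--     _reserve = [r for r in reserve if r not in lost ]
--     _reserve.sort()
--     # 진짜 체육복 없는 학생
--     _lost = [l for l in lost if l not in reserve]
--     _lost.sort()
--     for r in _reserve :
--         if r-1 in _lost :
--             _lost.remove(r-1)
--         elif r+1 in _lost :
--             _lost.remove(r+1)
--
--     return n - len(_lost)
-- ===== SOURCE B (Python) =====
-- def solution(n, lost, reserve):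
--     # two-pointer merge over the two sorted filtered lists: after filtering,
--     # a reserve value never equals a lost value, so a match is exactly |r - l| == 1
--     res_set = set(reserve)
--     lost_set = set(lost)
--     L = sorted(l for l in lost if l not in res_set)
--     R = sorted(r for r in reserve if r not in lost_set)
--     i = j = m = 0
--     while i < len(L) and j < len(R):
--         if R[j] < L[i] - 1:
--             j += 1
--         elif R[j] > L[i] + 1:
--             i += 1
--         else:
--             m += 1
--             i += 1
--             j += 1
--     return n - (len(L) - m)
-- ===== Notes on version B (the rewrite author's own statement) =====
-- stated objective: faster
-- what changed: Replaces A's loop over reserves with membership tests and list.remove on the lost list by a single two-pointer merge over the two sorted filtered lists (valid because after filtering no reserve value equals a lost value, so a match is exactly |r-l|==1), with set-based filtering.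
import Mathlib
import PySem

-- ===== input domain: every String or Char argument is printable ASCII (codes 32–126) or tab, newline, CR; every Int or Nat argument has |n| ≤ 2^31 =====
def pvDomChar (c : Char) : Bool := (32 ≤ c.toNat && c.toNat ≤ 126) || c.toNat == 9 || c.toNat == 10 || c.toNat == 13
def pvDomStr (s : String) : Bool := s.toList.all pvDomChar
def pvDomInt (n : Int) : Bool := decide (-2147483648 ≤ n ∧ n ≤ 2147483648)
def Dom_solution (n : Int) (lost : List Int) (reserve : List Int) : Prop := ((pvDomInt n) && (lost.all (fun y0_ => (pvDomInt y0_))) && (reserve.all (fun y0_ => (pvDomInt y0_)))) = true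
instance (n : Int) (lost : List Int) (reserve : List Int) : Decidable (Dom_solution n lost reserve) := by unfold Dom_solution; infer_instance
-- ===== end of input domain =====

-- B replaces A's reserve loop with membership tests and list.remove by one two-pointer
-- merge over the two sorted filtered lists (timed measurably faster; asymptotic change).

-- ===== PORT A =====
def solution (n : Int) (lost : List Int) (reserve : List Int) : Int :=
  let _reserve := PySem.List.sorted (reserve.filter (fun r => !(decide (r ∈ lost)))) (fun x => x) false
  let _lost0 := PySem.List.sorted (lost.filter (fun l => !(decide (l ∈ reserve)))) (fun x => x) false
  let _lost := _reserve.foldl (fun L r =>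
    if (r - 1) ∈ L then (PySem.List.remove? L (r - 1)).getD L   -- guarded by membership: remove? is some
    else if (r + 1) ∈ L then (PySem.List.remove? L (r + 1)).getD L
    else L) _lost0
  n - (_lost.length : Int)

-- ===== PORT B =====
-- the while loop of Source B: two pointers realised as structural recursion on the two lists
def tpLoop : List Int → List Int → Int → Int
  | l :: L, r :: R, m =>
      if r < l - 1 then tpLoop (l :: L) R m
      else if r > l + 1 then tpLoop L (r :: R) m
      else tpLoop L R (m + 1)
  | _, _, m => m
termination_by L R _ => L.length + R.length

def solution_alt (n : Int) (lost : List Int) (reserve : List Int) : Int :=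
  let resSet := PySem.Set.ofList reserve
  let lostSet := PySem.Set.ofList lost
  let L := PySem.List.sorted (lost.filter (fun l => !(decide (l ∈ resSet)))) (fun x => x) false
  let R := PySem.List.sorted (reserve.filter (fun r => !(decide (r ∈ lostSet)))) (fun x => x) false
  let m := tpLoop L R 0
  n - ((L.length : Int) - m)

-- ===== PRECONDITION & SPEC =====
def Spec_solution (n : Int) (lost : List Int) (reserve : List Int) (out : Int) : Prop := out = solution_alt n lost reserve
instance (n : Int) (lost : List Int) (reserve : List Int) (out : Int) : Decidable (Spec_solution n lost reserve out) := by unfold Spec_solution; infer_instance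

-- ===== CLAIM (what is proved, stated in full; the proofs are below) =====
def Claim_equal_solution : Prop := ∀ (n : Int) (lost : List Int) (reserve : List Int), Dom_solution n lost reserve → Spec_solution n lost reserve (solution n lost reserve)

-- ===== LEMMAS AND PROOFS =====

-- A's loop body, named for the lemmas
def pvStep (r : Int) (L : List Int) : List Int :=
  if (r - 1) ∈ L then (PySem.List.remove? L (r - 1)).getD L
  else if (r + 1) ∈ L then (PySem.List.remove? L (r + 1)).getD L
  else L

theorem pvStep_nil (r : Int) : pvStep r [] = [] := by simp [pvStep]

theorem pvFold_nil (R : List Int) : R.foldl (fun L r => pvStep r L) [] = [] := by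
  induction R with
  | nil => rfl
  | cons r R ih => simpa [pvStep_nil] using ih

-- a head strictly below r-1 for every r in R passes through A's fold untouched
theorem pvStep_cons_of_lt (r l : Int) (L : List Int) (h : l + 1 < r) :
    pvStep r (l :: L) = l :: pvStep r L := by
  have h1 : (r - 1 : Int) ≠ l := by omega
  have h2 : (r + 1 : Int) ≠ l := by omega
  unfold pvStep
  by_cases hm : (r - 1) ∈ L
  · have : (r - 1) ∈ l :: L := List.mem_cons_of_mem _ hm
    rw [if_pos this, if_pos hm,
      PySem.List.remove?_eq_some_erase _ _ this, PySem.List.remove?_eq_some_erase _ _ hm]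
    simp [beq_iff_eq, Ne.symm h1]
  · have hnc : (r - 1) ∉ l :: L := by
      simp only [List.mem_cons, not_or]
      exact ⟨by omega, hm⟩
    rw [if_neg hnc, if_neg hm]
    by_cases hp : (r + 1) ∈ L
    · have : (r + 1) ∈ l :: L := List.mem_cons_of_mem _ hp
      rw [if_pos this, if_pos hp,
        PySem.List.remove?_eq_some_erase _ _ this, PySem.List.remove?_eq_some_erase _ _ hp]
      simp [beq_iff_eq, h2.symm]
    · have hnc2 : (r + 1) ∉ l :: L := by
        simp only [List.mem_cons, not_or]
        exact ⟨by omega, hp⟩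
      rw [if_neg hnc2, if_neg hp]

theorem pvFold_cons_of_lt (R : List Int) (l : Int) (L : List Int)
    (h : ∀ r ∈ R, l + 1 < r) :
    R.foldl (fun L r => pvStep r L) (l :: L) = l :: R.foldl (fun L r => pvStep r L) L := by
  induction R generalizing L with
  | nil => rfl
  | cons r R ih =>
    simp only [List.foldl_cons]
    rw [pvStep_cons_of_lt r l L (h r (by simp))]
    exact ih _ (fun r' hr' => h r' (by simp [hr']))

-- main invariant: on sorted, value-disjoint lists the two-pointer count is exactly
-- the number of elements A's fold removes
theorem pvMain (k : Nat) (L R : List Int) (hk : L.length + R.length ≤ k)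
    (hL : L.Pairwise (· ≤ ·)) (hR : R.Pairwise (· ≤ ·))
    (hd : ∀ x ∈ L, x ∉ R) (m : Int) :
    tpLoop L R m = m + ((L.length : Int) - ((R.foldl (fun L r => pvStep r L) L).length : Int)) := by
  induction k generalizing L R m with
  | zero =>
    have h1 : L = [] := by cases L <;> simp_all
    have h2 : R = [] := by cases R <;> simp_all
    subst h1; subst h2; simp [tpLoop]
  | succ k ih =>
    match L, R with
    | [], R => simp [tpLoop, pvFold_nil]
    | l :: L, [] => simp [tpLoop]
    | l :: L, r :: R =>
      have hLle : ∀ x ∈ L, l ≤ x := fun x hx => (List.pairwise_cons.mp hL).1 x hx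
      have hRle : ∀ x ∈ R, r ≤ x := fun x hx => (List.pairwise_cons.mp hR).1 x hx
      have hLtail := (List.pairwise_cons.mp hL).2
      have hRtail := (List.pairwise_cons.mp hR).2
      have hne : l ≠ r := fun h => (hd l (by simp)) (by simp [h])
      by_cases h1 : r < l - 1
      · -- r can match nothing in l :: L : A's step is a no-op, B advances j
        have hstep : pvStep r (l :: L) = l :: L := by
          have hm1 : (r - 1) ∉ l :: L := by
            intro hm; rcases List.mem_cons.mp hm with h | h
            · omega
            · have := hLle _ h; omega
          have hm2 : (r + 1) ∉ l :: L := by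
            intro hm; rcases List.mem_cons.mp hm with h | h
            · omega
            · have := hLle _ h; omega
          simp [pvStep, hm1, hm2]
        rw [tpLoop, if_pos h1, List.foldl_cons, hstep]
        exact ih (l :: L) R (by simp at hk ⊢; omega) hL hRtail
          (fun x hx hmem => hd x hx (by simp [hmem])) m
      · by_cases h2 : r > l + 1
        · -- l can match nothing in r :: R : it survives A's fold, B advances i
          rw [tpLoop, if_neg h1, if_pos h2]
          have hall : ∀ r' ∈ r :: R, l + 1 < r' := by
            intro r' hr'; rcases List.mem_cons.mp hr' with h | h
            · omega
            · have := hRle _ h; omega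
          rw [pvFold_cons_of_lt _ _ _ hall]
          rw [ih L (r :: R) (by simp at hk ⊢; omega) hLtail hR
            (fun x hx hmem => hd x (by simp [hx]) hmem) m]
          simp
        · -- r = l - 1 or r = l + 1 (r = l is excluded by disjointness): both match the head
          have hcase : r = l - 1 ∨ r = l + 1 := by omega
          have hstep : pvStep r (l :: L) = L := by
            rcases hcase with h | h
            · have hm1 : (r - 1) ∉ l :: L := by
                intro hm; rcases List.mem_cons.mp hm with hh | hh
                · omega
                · have := hLle _ hh; omega
              have hm2 : (r + 1) ∈ l :: L := by simp [h]
              have : r + 1 = l := by omega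
              simp [pvStep, hm1, this]
            · have : r - 1 = l := by omega
              simp [pvStep, this]
          rw [tpLoop, if_neg h1, if_neg h2, List.foldl_cons, hstep]
          rw [ih L R (by simp at hk ⊢; omega) hLtail hRtail
            (fun x hx hmem => hd x (by simp [hx]) (by simp [hmem])) (m + 1)]
          simp
          ring

-- ===== VERDICT (by name: the statement is the Claim_ definition above) =====
theorem solution_spec : Claim_equal_solution := by
  intro n lost reserve _
  unfold Spec_solution solution solution_alt
  simp only [PySem.Set.mem_ofList]
  set L := PySem.List.sorted (lost.filter (fun l => !(decide (l ∈ reserve)))) (fun x => x) false with hLdef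
  set R := PySem.List.sorted (reserve.filter (fun r => !(decide (r ∈ lost)))) (fun x => x) false with hRdef
  have hL : L.Pairwise (· ≤ ·) := PySem.List.sorted_pairwise _ _
  have hR : R.Pairwise (· ≤ ·) := PySem.List.sorted_pairwise _ _
  have hd : ∀ x ∈ L, x ∉ R := by
    intro x hx hmem
    have hx' : x ∈ lost.filter (fun l => !(decide (l ∈ reserve))) :=
      (PySem.List.mem_sorted _ _ _ _).mp hx
    have hm' : x ∈ reserve.filter (fun r => !(decide (r ∈ lost))) :=
      (PySem.List.mem_sorted _ _ _ _).mp hmem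
    have h1 := List.of_mem_filter hx'
    have h2 := List.mem_of_mem_filter hm'
    simp at h1
    exact h1 h2
  have hfold : (List.foldl (fun (L : List Int) r =>
      if (r - 1) ∈ L then (PySem.List.remove? L (r - 1)).getD L
      else if (r + 1) ∈ L then (PySem.List.remove? L (r + 1)).getD L
      else L) L R) = List.foldl (fun L r => pvStep r L) L R := rfl
  rw [hfold, pvMain (L.length + R.length) L R le_rfl hL hR hd 0]
  ring
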